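-- pv_equiv track=rewrite | github.com/GMLC-TDC/helics_benchmark_results | scripts/cross_run_id_pdf.py | get_run_id_keys
-- ===== SOURCE A (Python) =====
-- def get_run_id_keys(json_results, run_id_list):
--     """This function finds the key used in the json_results dictionary
--     for a given run ID. These dictionary keys are the files names and
--     there are potentially many keys that are associated with a run ID.
--     For the intended purposes of this function (metadata comparison),
--     any file associated with the run ID will have the same metadata as
--     any other file associated with the run ID; it doesn't matter which
--     one we use.
--
--     Args:
--         json_results (dict) - benchmark results
--         run_id_list (list) - List of strings of the run-IDs being compared
--
--     Returns:
--         run_id_keys (dict) - Dictionary relating run-IDs (five character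
--         unique IDs) and the key for said run ID in the json_results
--         dictionary.
--     """
--     run_id_keys = {}
--     for run_id in run_id_list:
--         for key in json_results:
--             if run_id in key:
--                 if run_id not in run_id_keys:
--                     run_id_keys[run_id] = key
--                     break
--     return run_id_keys
-- ===== SOURCE B (Python) =====
-- def get_run_id_keys(json_results, run_id_list):
--     # Single pass over json_results keys: keep the still-unmatched run-IDs
--     # and record each run-ID's first matching key; stop early when all are matched.
--     remaining = list(dict.fromkeys(run_id_list))
--     first_key = {}
--     for key in json_results:
--         if not remaining:
--             break
--         still = []
--         for rid in remaining:
--             if rid in key: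
--                 first_key[rid] = key
--             else:
--                 still.append(rid)
--         remaining = still
--     return {rid: first_key[rid] for rid in run_id_list if rid in first_key}
-- ===== Notes on version B (the rewrite author's own statement) =====
-- stated objective: alternative
-- what changed: A rescans all keys for every run-ID (outer loop over run_id_list, inner scan of keys with break); B makes a single pass over the keys maintaining the set of still-unmatched run-IDs (with early exit once empty) and then assembles the result in run_id_list order.
import Mathlib
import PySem

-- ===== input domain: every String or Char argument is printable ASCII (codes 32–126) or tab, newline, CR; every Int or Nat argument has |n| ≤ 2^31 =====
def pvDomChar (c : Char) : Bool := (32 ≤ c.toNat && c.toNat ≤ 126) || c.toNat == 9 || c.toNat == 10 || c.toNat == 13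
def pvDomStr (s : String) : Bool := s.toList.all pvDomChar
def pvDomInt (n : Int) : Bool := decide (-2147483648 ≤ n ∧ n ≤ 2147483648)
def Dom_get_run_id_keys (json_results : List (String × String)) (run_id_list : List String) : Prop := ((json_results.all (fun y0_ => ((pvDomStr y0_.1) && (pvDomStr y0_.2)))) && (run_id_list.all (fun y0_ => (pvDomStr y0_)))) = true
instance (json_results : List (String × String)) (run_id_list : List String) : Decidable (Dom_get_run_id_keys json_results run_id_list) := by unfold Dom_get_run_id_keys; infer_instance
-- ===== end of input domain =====

-- B replaces A's per-run-ID rescans of the keys by a single key pass over a maintained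
-- list of still-unmatched run-IDs (alternative decomposition; same worst-case cost).


-- ===== PORT A =====
-- inner 'for key in json_results: …' loop with its break
def pvKeyLoopA (run_id : String) (keys : List (String × String))
    (acc : PySem.Dict String String) : PySem.Dict String String :=
  match keys with
  | [] => acc
  | (key, _) :: rest =>
    if PySem.Str.isIn run_id key then
      if ¬ acc.contains run_id then
        acc.insert run_id key           -- then break
      else
        pvKeyLoopA run_id rest acc
    else
      pvKeyLoopA run_id rest acc

def get_run_id_keys (json_results : List (String × String)) (run_id_list : List String) : List (String × String) :=
  (run_id_list.foldl (fun acc run_id => pvKeyLoopA run_id json_results acc)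
    (PySem.Dict.empty : PySem.Dict String String)).items

-- ===== PORT B =====
-- single pass over the keys, carrying (first_key, remaining); breaks when remaining = []
def pvScanKeysB (keys : List (String × String))
    (first_key : PySem.Dict String String) (remaining : List String) : PySem.Dict String String :=
  match keys with
  | [] => first_key
  | (key, _) :: rest =>
    if remaining.isEmpty then first_key   -- break
    else
      let st := remaining.foldl
        (fun (st : PySem.Dict String String × List String) rid =>
          if PySem.Str.isIn rid key then (st.1.insert rid key, st.2)
          else (st.1, st.2 ++ [rid]))
        (first_key, [])
      pvScanKeysB rest st.1 st.2

def get_run_id_keys_alt (json_results : List (String × String)) (run_id_list : List String) : List (String × String) :=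
  let first_key := pvScanKeysB json_results PySem.Dict.empty (PySem.List.dedup run_id_list)
  -- final dict comprehension in run_id_list order
  (run_id_list.foldl
    (fun out rid =>
      match first_key.get? rid with
      | some v => out.insert rid v
      | none => out)
    (PySem.Dict.empty : PySem.Dict String String)).items

-- ===== PRECONDITION & SPEC =====
def Spec_get_run_id_keys (json_results : List (String × String)) (run_id_list : List String) (out : List (String × String)) : Prop := out = get_run_id_keys_alt json_results run_id_list
instance (json_results : List (String × String)) (run_id_list : List String) (out : List (String × String)) : Decidable (Spec_get_run_id_keys json_results run_id_list out) := by unfold Spec_get_run_id_keys; infer_instance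

-- ===== CLAIM (what is proved, stated in full; the proofs are below) =====
def Claim_equal_get_run_id_keys : Prop := ∀ (json_results : List (String × String)) (run_id_list : List String), Dom_get_run_id_keys json_results run_id_list → Spec_get_run_id_keys json_results run_id_list (get_run_id_keys json_results run_id_list)

-- ===== LEMMAS AND PROOFS =====

-- the first key of json_results that contains rid as a substring
def pvFirstMatch (rid : String) (keys : List (String × String)) : Option String :=
  match keys with
  | [] => none
  | (key, _) :: rest => if PySem.Str.isIn rid key then some key else pvFirstMatch rid rest

theorem pvKeyLoopA_eq (rid : String) (keys : List (String × String)) (acc : PySem.Dict String String) :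
    pvKeyLoopA rid keys acc =
      if acc.contains rid then acc
      else match pvFirstMatch rid keys with
           | some k => acc.insert rid k
           | none => acc := by
  induction keys with
  | nil =>
    simp only [pvKeyLoopA, pvFirstMatch]
    split <;> rfl
  | cons p rest ih =>
    obtain ⟨key, v⟩ := p
    simp only [pvKeyLoopA, pvFirstMatch]
    by_cases hin : PySem.Chars.isIn rid.toList key.toList = true <;>
      by_cases hc : acc.contains rid = true <;>
      simp [hin, hc, ih]

theorem pvScan_state (key : String) (remaining : List String)
    (first_key : PySem.Dict String String) (acc2 : List String) :
    (remaining.foldl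
      (fun (st : PySem.Dict String String × List String) rid =>
        if PySem.Str.isIn rid key then (st.1.insert rid key, st.2)
        else (st.1, st.2 ++ [rid]))
      (first_key, acc2)) =
      (remaining.foldl (fun d rid => if PySem.Str.isIn rid key then d.insert rid key else d) first_key,
       acc2 ++ remaining.filter (fun rid => !(PySem.Str.isIn rid key))) := by
  induction remaining generalizing first_key acc2 with
  | nil => simp
  | cons r rest ih =>
    simp only [PySem.Str.isIn_eq] at ih
    by_cases h : PySem.Chars.isIn r.toList key.toList = true <;>
      simp [h, ih]

theorem pvScan_get? (key : String) (remaining : List String)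
    (first_key : PySem.Dict String String) (rid : String) :
    (remaining.foldl (fun d r => if PySem.Str.isIn r key then d.insert r key else d) first_key).get? rid =
      if rid ∈ remaining ∧ PySem.Chars.isIn rid.toList key.toList = true then some key
      else first_key.get? rid := by
  induction remaining generalizing first_key with
  | nil => simp
  | cons r rest ih =>
    simp only [List.foldl_cons, ih]
    by_cases hmem : rid ∈ rest ∧ PySem.Chars.isIn rid.toList key.toList = true
    · simp [hmem, List.mem_cons]
    · rw [if_neg hmem]
      by_cases hr : rid = r
      · subst hr
        by_cases hin : PySem.Chars.isIn rid.toList key.toList = true <;>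
          simp_all [PySem.Dict.get?_insert_self]
      · have hne : ¬(rid ∈ r :: rest ∧ PySem.Chars.isIn rid.toList key.toList = true) := by
          intro h
          rcases h with ⟨hm, hi⟩
          rcases List.mem_cons.mp hm with h' | h'
          · exact hr h'
          · exact hmem ⟨h', hi⟩
        rw [if_neg hne]
        by_cases hin : PySem.Chars.isIn r.toList key.toList = true <;>
          simp [hin, PySem.Dict.get?_insert, hr]

theorem pvScanKeysB_get? (keys : List (String × String)) (first_key : PySem.Dict String String)
    (remaining : List String) (rid : String) :
    (pvScanKeysB keys first_key remaining).get? rid =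
      if rid ∈ remaining then
        match pvFirstMatch rid keys with
        | some k => some k
        | none => first_key.get? rid
      else first_key.get? rid := by
  induction keys generalizing first_key remaining with
  | nil =>
    simp only [pvScanKeysB, pvFirstMatch]
    split <;> rfl
  | cons p rest ih =>
    obtain ⟨key, v⟩ := p
    simp only [pvScanKeysB]
    by_cases hemp : remaining.isEmpty
    · have hnil : remaining = [] := List.isEmpty_iff.mp hemp
      subst hnil; simp
    · rw [if_neg hemp]
      simp only [pvScan_state, ih, pvScan_get?, pvFirstMatch]
      by_cases hmem : rid ∈ remaining
      · by_cases hin : PySem.Chars.isIn rid.toList key.toList = true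
        · simp [hmem, hin]
        · simp [hmem, hin]
      · simp [hmem]

-- re-inserting a present binding with its own value changes nothing
theorem pvInsert_self (d : PySem.Dict String String) (k v : String)
    (hnd : d.keys.Nodup) (h : d.get? k = some v) : d.insert k v = d := by
  apply PySem.Dict.ext
  have hc : d.contains k = true := by
    rw [PySem.Dict.contains_eq_isSome_get?, h]; rfl
  rw [PySem.Dict.items_insert_of_contains _ _ hc]
  conv_rhs => rw [← List.map_id d.items]
  apply List.map_congr_left
  intro p hp
  by_cases hpk : p.1 = k
  · have hget : d.get? p.1 = some p.2 :=
      PySem.Dict.get?_of_mem_items d (by simpa using hp) hnd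
    rw [hpk] at hget
    rw [h] at hget
    have hv : v = p.2 := by injection hget
    simp [hpk, hv]
    exact Prod.ext hpk.symm rfl
  · simp [hpk]

-- the two output-building folds agree, given the invariant that every binding of acc
-- records the first matching key of its run-ID
theorem pvOut_fold_eq (jr : List (String × String)) (ril : List String)
    (acc : PySem.Dict String String) (hnd : acc.keys.Nodup)
    (hinv : ∀ r v, acc.get? r = some v → pvFirstMatch r jr = some v) :
    ril.foldl (fun acc run_id => pvKeyLoopA run_id jr acc) acc =
    ril.foldl (fun out rid =>
      match pvFirstMatch rid jr with
      | some v => out.insert rid v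
      | none => out) acc := by
  induction ril generalizing acc with
  | nil => rfl
  | cons rid rest ih =>
    simp only [List.foldl_cons]
    rw [pvKeyLoopA_eq rid jr acc]
    cases hfm : pvFirstMatch rid jr with
    | none =>
      by_cases hc : acc.contains rid = true
      · rw [if_pos hc]; exact ih acc hnd hinv
      · rw [if_neg hc]; exact ih acc hnd hinv
    | some k =>
      by_cases hc : acc.contains rid = true
      · rw [if_pos hc]
        have hsome : (acc.get? rid).isSome := by
          rw [← PySem.Dict.contains_eq_isSome_get?]; exact hc
        obtain ⟨v, hv⟩ := Option.isSome_iff_exists.mp hsome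
        have hkv : k = v := by
          have := hinv rid v hv
          rw [hfm] at this
          injection this
        have hins : acc.insert rid k = acc :=
          pvInsert_self acc rid k hnd (by rw [hv, hkv])
        have hrhs : rest.foldl (fun out rid =>
            match pvFirstMatch rid jr with
            | some v => out.insert rid v
            | none => out) (acc.insert rid k) =
            rest.foldl (fun out rid =>
              match pvFirstMatch rid jr with
              | some v => out.insert rid v
              | none => out) acc := by rw [hins]
        exact (ih acc hnd hinv).trans hrhs.symm
      · rw [if_neg hc]
        refine ih (acc.insert rid k) (PySem.Dict.nodup_keys_insert _ _ _ hnd) ?_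
        intro r v hv
        by_cases hr : r = rid
        · subst hr
          rw [PySem.Dict.get?_insert_self] at hv
          cases hv
          exact hfm
        · rw [PySem.Dict.get?_insert, if_neg hr] at hv
          exact hinv r v hv

-- ===== VERDICT (by name: the statement is the Claim_ definition above) =====
theorem get_run_id_keys_spec : Claim_equal_get_run_id_keys := by
  intro jr ril _
  unfold Spec_get_run_id_keys get_run_id_keys get_run_id_keys_alt
  have hstep : ∀ (out : PySem.Dict String String) (rid : String), rid ∈ ril →
      (match (pvScanKeysB jr PySem.Dict.empty (PySem.List.dedup ril)).get? rid with
        | some v => out.insert rid v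
        | none => out) =
      (match pvFirstMatch rid jr with
        | some v => out.insert rid v
        | none => out) := by
    intro out rid hmem
    have hdm : rid ∈ PySem.List.dedup ril := by
      rw [PySem.List.mem_dedup]; exact hmem
    rw [pvScanKeysB_get?, if_pos hdm]
    cases pvFirstMatch rid jr <;> simp [PySem.Dict.get?_empty]
  have hfold : ∀ (out : PySem.Dict String String) (l : List String), (∀ r ∈ l, r ∈ ril) →
      l.foldl (fun out rid =>
        match (pvScanKeysB jr PySem.Dict.empty (PySem.List.dedup ril)).get? rid with
        | some v => out.insert rid v
        | none => out) out =
      l.foldl (fun out rid =>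
        match pvFirstMatch rid jr with
        | some v => out.insert rid v
        | none => out) out := by
    intro out l hsub
    induction l generalizing out with
    | nil => rfl
    | cons x xs ihx =>
      simp only [List.foldl_cons]
      rw [hstep out x (hsub x (List.mem_cons_self))]
      exact ihx _ (fun r hr => hsub r (List.mem_cons_of_mem _ hr))
  show (List.foldl (fun acc run_id => pvKeyLoopA run_id jr acc) PySem.Dict.empty ril).items =
    (List.foldl (fun out rid =>
        match (pvScanKeysB jr PySem.Dict.empty (PySem.List.dedup ril)).get? rid with
        | some v => out.insert rid v
        | none => out) PySem.Dict.empty ril).items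
  rw [hfold PySem.Dict.empty ril (fun r hr => hr)]
  rw [pvOut_fold_eq jr ril PySem.Dict.empty PySem.Dict.nodup_keys_empty
    (fun r v hv => by rw [PySem.Dict.get?_empty] at hv; cases hv)]
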